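-- pv_equiv track=rewrite | github.com/MohiuddinSohel/Leetcoding | amazonOAPreparation/OA.py | LCM_HCF
-- ===== SOURCE A (Python) =====
-- def LCM_HCF(A):
--     # Find the maximum value in the list
--     n = max(A)
--
--     # Initialize the divisors list
--     divisors = [0] * (n + 1)
--
--     # Count divisors for each number up to n
--     for i in range(1, n + 1):
--         for j in range(i, n + 1, i):
--             divisors[j] += 1
--
--     # Calculate the result by summing up the divisor counts for each element in A
--     res = 0
--     for i in range(len(A)):
--         res += divisors[A[i]]
--     return res
-- ===== SOURCE B (Python) =====
-- from math import isqrt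
--
-- def LCM_HCF(A):
--     # Per-element divisor counting by trial division up to sqrt(x),
--     # instead of a shared sieve up to max(A).
--     total = 0
--     for x in A:
--         c = 0
--         for d in range(1, isqrt(x) + 1):
--             if x % d == 0:
--                 c += 1 if d * d == x else 2
--         total += c
--     return total
-- ===== Notes on version B (the rewrite author's own statement) =====
-- stated objective: alternative
-- what changed: Replaced the shared divisor-count sieve over all numbers up to max(A) (a table build plus per-element lookups) by independent per-element trial division up to sqrt(x) that counts each divisor pair once.
-- outside the precondition, e.g. on LCM_HCF([-1, 5]): A returns 4, B raises ValueError
import Mathlib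
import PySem

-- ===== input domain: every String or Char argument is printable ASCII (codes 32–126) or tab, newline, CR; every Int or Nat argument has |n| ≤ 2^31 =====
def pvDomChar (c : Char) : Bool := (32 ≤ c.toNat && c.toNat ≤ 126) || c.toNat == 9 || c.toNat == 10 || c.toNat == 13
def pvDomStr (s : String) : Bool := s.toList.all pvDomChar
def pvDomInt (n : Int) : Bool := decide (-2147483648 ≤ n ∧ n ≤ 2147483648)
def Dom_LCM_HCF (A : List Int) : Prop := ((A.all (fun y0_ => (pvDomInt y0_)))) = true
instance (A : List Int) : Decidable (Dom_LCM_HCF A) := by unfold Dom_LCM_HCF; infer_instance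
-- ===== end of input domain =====

-- B replaces A's shared divisor-count sieve up to max(A) by independent
-- per-element trial division up to sqrt(x) (objective: alternative).

-- ===== PORT A =====
-- divisors[j] += 1  (one in-place increment of the sieve cell; j nonnegative and in range in A's loop)
def pvBump (l : List Int) (j : Int) : List Int :=
  PySem.List.pySetD l j (PySem.List.pyGetD l j 0 + 1)

def LCM_HCF (A : List Int) : Int :=
  -- n = max(A)  (max of the empty list raises ValueError: excluded by Pre_)
  let n := (PySem.List.max? A (fun x => x)).getD 0
  -- divisors = [0] * (n + 1)
  let divisors : List Int := List.replicate (n + 1).toNat 0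
  -- for i in range(1, n + 1): for j in range(i, n + 1, i): divisors[j] += 1
  let divisors := (PySem.List.pyRange 1 (n + 1) 1).foldl
      (fun divs i => (PySem.List.pyRange i (n + 1) i).foldl pvBump divs) divisors
  -- res = 0; for i in range(len(A)): res += divisors[A[i]]  (indices in range under Pre_)
  (PySem.List.pyRange 0 (A.length : Int) 1).foldl
      (fun res i => res + PySem.List.pyGetD divisors (PySem.List.pyGetD A i 0) 0) 0

-- ===== PORT B =====
-- c = 0; for d in range(1, isqrt(x) + 1): if x % d == 0: c += 1 if d*d == x else 2
-- (isqrt(x) = Nat.sqrt x.toNat, exact for 0 ≤ x; Python's isqrt raises ValueError on x < 0, excluded by Pre_)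
def pvDivCount (x : Int) : Int :=
  (PySem.List.pyRange 1 ((Nat.sqrt x.toNat : Int) + 1) 1).foldl
    (fun c d => if PySem.Int.mod x d == 0 then c + (if d * d == x then 1 else 2) else c) 0

def LCM_HCF_alt (A : List Int) : Int :=
  A.foldl (fun total x => total + pvDivCount x) 0

-- ===== PRECONDITION & SPEC =====
-- Pre_ excludes the empty list (A's max([]) raises ValueError) and lists with a
-- negative element: there A either raises IndexError or returns a value produced
-- by Python's negative-index wraparound into the sieve array, while B's isqrt
-- raises ValueError.
def Pre_LCM_HCF (A : List Int) : Prop := A ≠ [] ∧ ∀ x ∈ A, 0 ≤ x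
instance (A : List Int) : Decidable (Pre_LCM_HCF A) := by unfold Pre_LCM_HCF; infer_instance

def pvWitness_LCM_HCF : List Int := [1, 2, 12, 0, 12]

def Spec_LCM_HCF (A : List Int) (out : Int) : Prop := out = LCM_HCF_alt A
instance (A : List Int) (out : Int) : Decidable (Spec_LCM_HCF A out) := by unfold Spec_LCM_HCF; infer_instance

-- ===== CLAIM (what is proved, stated in full; the proofs are below) =====
def Claim_equal_LCM_HCF : Prop := ∀ (A : List Int), Dom_LCM_HCF A → Pre_LCM_HCF A → Spec_LCM_HCF A (LCM_HCF A)

-- ===== LEMMAS AND PROOFS =====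

theorem pvBump_length (l : List Int) (j : Int) : (pvBump l j).length = l.length := by
  simp [pvBump, PySem.List.length_pySetD]

theorem pvBump_foldl_length (L : List Int) (l : List Int) :
    (L.foldl pvBump l).length = l.length := by
  induction L generalizing l with
  | nil => rfl
  | cons m L ih => simp [List.foldl_cons, ih, pvBump_length]

theorem pvBump_foldl_getD (L : List Int) (l : List Int) (j : ℕ)
    (hL : ∀ m ∈ L, 0 ≤ m ∧ m < (l.length : Int)) :
    (L.foldl pvBump l).getD j 0 = l.getD j 0 + (L.count (j : Int) : Int) := by
  induction L generalizing l with
  | nil => simp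
  | cons m L ih =>
    obtain ⟨hm0, hmlt⟩ := hL m (by simp)
    have hlen : (pvBump l m).length = l.length := pvBump_length l m
    rw [List.foldl_cons, ih _ (fun x hx => by
      have := hL x (List.mem_cons_of_mem _ hx); rw [hlen]; exact this)]
    have hset : pvBump l m = l.set m.toNat (l.getD m.toNat 0 + 1) := by
      rw [pvBump, PySem.List.pySetD_of_nonneg _ _ hm0, PySem.List.pyGetD_of_nonneg _ _ hm0]
    by_cases hmj : m = (j : Int)
    · have hmt : m.toNat = j := by omega
      have hjlt : j < l.length := by omega
      rw [hset, hmj, List.count_cons_self, Int.toNat_natCast]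
      have : (l.set j (l.getD j 0 + 1)).getD j 0 = l.getD j 0 + 1 := by
        simp [List.getD, hjlt]
      rw [this]; push_cast; ring
    · rw [hset, List.count_cons_of_ne (by simpa using hmj)]
      have hne : m.toNat ≠ j := by omega
      have : (l.set m.toNat (l.getD m.toNat 0 + 1)).getD j 0 = l.getD j 0 := by
        simp [List.getD, hne]
      rw [this]


theorem count_pyRange_step (i n : Int) (j : ℕ) (hi : 1 ≤ i) :
    ((PySem.List.pyRange i (n + 1) i).count (j : Int) : Int)
      = if (i ∣ (j : Int) ∧ i ≤ (j : Int) ∧ (j : Int) ≤ n) then 1 else 0 := by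
  have hpos : (0 : Int) < i := by omega
  have hnd : (PySem.List.pyRange i (n + 1) i).Nodup := by
    rw [PySem.List.pyRange_of_pos _ _ hpos]
    refine List.Nodup.map ?_ (List.nodup_range)
    intro a b hab
    have : (a : Int) = b := by
      have := hab
      nlinarith [this]
    exact_mod_cast this
  have hmem := PySem.List.mem_pyRange_iff_of_pos (a := i) (b := n + 1) hpos (j : Int)
  by_cases h : i ∣ (j : Int) ∧ i ≤ (j : Int) ∧ (j : Int) ≤ n
  · rw [if_pos h]
    have hin : (j : Int) ∈ PySem.List.pyRange i (n + 1) i := by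
      rw [hmem]
      refine ⟨h.2.1, by omega, ?_⟩
      exact dvd_sub h.1 (dvd_refl i)
    rw [List.count_eq_one_of_mem hnd hin]; norm_num
  · rw [if_neg h]
    have hnin : (j : Int) ∉ PySem.List.pyRange i (n + 1) i := by
      rw [hmem]
      rintro ⟨h1, h2, h3⟩
      exact h ⟨by have := dvd_add h3 (dvd_refl i); simpa using this, h1, by omega⟩
    rw [List.count_eq_zero_of_not_mem hnin]; norm_num

theorem sieve_outer_fold (n : Int) (j : ℕ) (I : List Int) (l : List Int)
    (hI : ∀ i ∈ I, 1 ≤ i) (hlen : (l.length : Int) = n + 1) :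
    (I.foldl (fun divs i => (PySem.List.pyRange i (n + 1) i).foldl pvBump divs) l).getD j 0
      = l.getD j 0
        + (I.map (fun i => if (i ∣ (j : Int) ∧ i ≤ (j : Int) ∧ (j : Int) ≤ n) then (1 : Int) else 0)).sum := by
  induction I generalizing l with
  | nil => simp
  | cons i I ih =>
    have hi : 1 ≤ i := hI i (by simp)
    have hL : ∀ m ∈ PySem.List.pyRange i (n + 1) i, 0 ≤ m ∧ m < (l.length : Int) := by
      intro m hm
      rw [PySem.List.mem_pyRange_iff_of_pos (by omega : (0:Int) < i)] at hm
      exact ⟨by omega, by omega⟩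
    rw [List.foldl_cons, ih _ (fun x hx => hI x (List.mem_cons_of_mem _ hx))
        (by rw [pvBump_foldl_length]; exact hlen),
      pvBump_foldl_getD _ _ _ hL, count_pyRange_step i n j hi]
    simp [add_assoc]

theorem list_range_map_sum (N : ℕ) (g : ℕ → Int) :
    ((List.range N).map g).sum = ∑ k ∈ Finset.range N, g k := by
  induction N with
  | zero => simp
  | succ N ih => rw [List.range_succ, Finset.sum_range_succ, List.map_append, List.sum_append, ih]; simp

theorem divisor_filter_Ico (j N : ℕ) (hj : j ≤ N) :
    (Finset.Ico 1 (N + 1)).filter (fun d => d ∣ j ∧ d ≤ j) = j.divisors := by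
  ext d
  simp only [Finset.mem_filter, Finset.mem_Ico, Nat.mem_divisors]
  constructor
  · rintro ⟨⟨h1, h2⟩, hd, hdj⟩
    exact ⟨hd, by omega⟩
  · rintro ⟨hd, hj0⟩
    have hj1 : 1 ≤ j := Nat.pos_of_ne_zero hj0
    have hd1 : 1 ≤ d := Nat.pos_of_dvd_of_pos hd hj1
    have hdj : d ≤ j := Nat.le_of_dvd hj1 hd
    exact ⟨⟨hd1, by omega⟩, hd, hdj⟩

theorem sieve_sum_eq_divisors (n : Int) (hn : 0 ≤ n) (j : ℕ) (hj : (j : Int) ≤ n) :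
    ((PySem.List.pyRange 1 (n + 1) 1).map
        (fun i => if (i ∣ (j : Int) ∧ i ≤ (j : Int) ∧ (j : Int) ≤ n) then (1 : Int) else 0)).sum
      = (j.divisors.card : Int) := by
  have hN : (n + 1 - 1).toNat = n.toNat := by omega
  rw [PySem.List.pyRange_one, hN, List.map_map, list_range_map_sum]
  have hstep : ∀ k ∈ Finset.range n.toNat,
      ((fun i => if (i ∣ (j : Int) ∧ i ≤ (j : Int) ∧ (j : Int) ≤ n) then (1 : Int) else 0) ∘
        fun k : ℕ => (1 : Int) + ↑k) k
        = (fun d => if ((d ∣ j ∧ d ≤ j) : Prop) then (1 : Int) else 0) (1 + k) := by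
    intro k _
    simp only [Function.comp]
    congr 1
    have hcast : ((1 + k : ℕ) : Int) = 1 + (k : Int) := by push_cast; ring
    rw [eq_iff_iff]
    constructor
    · rintro ⟨h1, h2, h3⟩
      constructor
      · exact_mod_cast (hcast ▸ h1 : ((1 + k : ℕ) : Int) ∣ (j : Int))
      · omega
    · rintro ⟨h1, h2⟩
      refine ⟨?_, by omega, hj⟩
      have : ((1 + k : ℕ) : Int) ∣ (j : Int) := Int.natCast_dvd_natCast.mpr h1
      rwa [hcast] at this
  rw [Finset.sum_congr rfl hstep]
  have hIco := Finset.sum_Ico_eq_sum_range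
    (f := fun d => if (d ∣ j ∧ d ≤ j) then (1 : Int) else 0) (m := 1) (n := n.toNat + 1)
  simp only [Nat.add_sub_cancel] at hIco
  rw [← hIco]
  have hsb : ∑ d ∈ Finset.Ico 1 (n.toNat + 1), (if (d ∣ j ∧ d ≤ j) then (1 : Int) else 0)
      = (((Finset.Ico 1 (n.toNat + 1)).filter (fun d => d ∣ j ∧ d ≤ j)).card : Int) := by
    rw [Finset.sum_boole]
  rw [hsb, divisor_filter_Ico j n.toNat (by omega)]

theorem sqrt_pair_card (m : ℕ) (hm : 1 ≤ m) :
    (m.divisors.filter (fun d => m < d * d)).card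
      = (m.divisors.filter (fun d => d * d < m)).card := by
  apply Finset.card_bij' (i := fun d _ => m / d) (j := fun e _ => m / e)
  · intro d hd
    simp only [Finset.mem_filter, Nat.mem_divisors] at hd ⊢
    obtain ⟨⟨hdvd, hm0⟩, hlt⟩ := hd
    have hd0 : 0 < d := Nat.pos_of_dvd_of_pos hdvd (by omega)
    have heq : d * (m / d) = m := Nat.mul_div_cancel' hdvd
    have he0 : 0 < m / d := by
      rcases Nat.eq_zero_or_pos (m / d) with h | h
      · rw [h, Nat.mul_zero] at heq; omega
      · exact h
    have helt : m / d < d := by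
      by_contra hge
      rw [Nat.not_lt] at hge
      have : d * d ≤ d * (m / d) := Nat.mul_le_mul_left d hge
      omega
    refine ⟨⟨Nat.div_dvd_of_dvd hdvd, hm0⟩, ?_⟩
    calc m / d * (m / d) < m / d * d := by
          exact (Nat.mul_lt_mul_left he0).mpr helt
      _ = m := by rw [Nat.mul_comm]; exact heq
  · intro e he
    simp only [Finset.mem_filter, Nat.mem_divisors] at he ⊢
    obtain ⟨⟨hdvd, hm0⟩, hlt⟩ := he
    have he0 : 0 < e := Nat.pos_of_dvd_of_pos hdvd (by omega)
    have heq : e * (m / e) = m := Nat.mul_div_cancel' hdvd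
    have hd0 : 0 < m / e := by
      rcases Nat.eq_zero_or_pos (m / e) with h | h
      · rw [h, Nat.mul_zero] at heq; omega
      · exact h
    have hegt : e < m / e := by
      by_contra hge
      rw [Nat.not_lt] at hge
      have : e * (m / e) ≤ e * e := Nat.mul_le_mul_left e hge
      omega
    refine ⟨⟨Nat.div_dvd_of_dvd hdvd, hm0⟩, ?_⟩
    calc m = e * (m / e) := heq.symm
      _ < m / e * (m / e) := (Nat.mul_lt_mul_right hd0).mpr hegt
  · intro d hd
    simp only [Finset.mem_filter, Nat.mem_divisors] at hd
    exact Nat.div_div_self hd.1.1 hd.1.2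
  · intro e he
    simp only [Finset.mem_filter, Nat.mem_divisors] at he
    exact Nat.div_div_self he.1.1 he.1.2

theorem sqrt_pair_sum (m : ℕ) :
    (∑ d ∈ Finset.Ico 1 (Nat.sqrt m + 1),
        (if d ∣ m then (if d * d = m then (1 : Int) else 2) else 0))
      = (m.divisors.card : Int) := by
  rcases Nat.eq_zero_or_pos m with hm0 | hm
  · subst hm0; simp
  have h1 : (∑ d ∈ Finset.Ico 1 (Nat.sqrt m + 1),
      (if d ∣ m then (if d * d = m then (1 : Int) else 2) else 0))
      = ∑ d ∈ (Finset.Ico 1 (Nat.sqrt m + 1)).filter (fun d => d ∣ m),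
          (if d * d = m then (1 : Int) else 2) := by
    rw [Finset.sum_filter]
  have h2 : (Finset.Ico 1 (Nat.sqrt m + 1)).filter (fun d => d ∣ m)
      = m.divisors.filter (fun d => d * d ≤ m) := by
    ext d
    simp only [Finset.mem_filter, Finset.mem_Ico, Nat.mem_divisors]
    constructor
    · rintro ⟨⟨hd1, hdr⟩, hdvd⟩
      refine ⟨⟨hdvd, by omega⟩, ?_⟩
      have : d ≤ Nat.sqrt m := by omega
      exact Nat.le_sqrt.mp this
    · rintro ⟨⟨hdvd, hm0⟩, hsq⟩
      have hd1 : 1 ≤ d := Nat.pos_of_dvd_of_pos hdvd (by omega)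
      have : d ≤ Nat.sqrt m := Nat.le_sqrt.mpr hsq
      exact ⟨⟨hd1, by omega⟩, hdvd⟩
  have h3 : ∑ d ∈ m.divisors.filter (fun d => d * d ≤ m), (if d * d = m then (1 : Int) else 2)
      = ((m.divisors.filter (fun d => d * d = m)).card : Int)
        + 2 * ((m.divisors.filter (fun d => d * d < m)).card : Int) := by
    rw [Finset.sum_ite]
    have e1 : (m.divisors.filter (fun d => d * d ≤ m)).filter (fun d => d * d = m)
        = m.divisors.filter (fun d => d * d = m) := by
      rw [Finset.filter_filter]
      apply Finset.filter_congr
      intro d _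
      constructor
      · rintro ⟨_, h⟩; exact h
      · intro h; omega
    have e2 : (m.divisors.filter (fun d => d * d ≤ m)).filter (fun d => ¬ d * d = m)
        = m.divisors.filter (fun d => d * d < m) := by
      rw [Finset.filter_filter]
      apply Finset.filter_congr
      intro d _
      constructor
      · rintro ⟨h1', h2'⟩; omega
      · intro h; omega
    rw [e1, e2, Finset.sum_const, Finset.sum_const]
    simp
    ring
  have h4 : m.divisors.card
      = (m.divisors.filter (fun d => d * d = m)).card
        + 2 * (m.divisors.filter (fun d => d * d < m)).card := by
    have hsplit := Finset.card_filter_add_card_filter_not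
      (s := m.divisors) (p := fun d => d * d ≤ m)
    have hne : m.divisors.filter (fun d => ¬ d * d ≤ m)
        = m.divisors.filter (fun d => m < d * d) := by
      apply Finset.filter_congr
      intro d _
      constructor
      · intro h; omega
      · intro h; omega
    have hsplit2 := Finset.card_filter_add_card_filter_not
      (s := m.divisors.filter (fun d => d * d ≤ m)) (p := fun d => d * d = m)
    have e1 : (m.divisors.filter (fun d => d * d ≤ m)).filter (fun d => d * d = m)
        = m.divisors.filter (fun d => d * d = m) := by
      rw [Finset.filter_filter]
      apply Finset.filter_congr
      intro d _
      constructor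
      · rintro ⟨_, h⟩; exact h
      · intro h; omega
    have e2 : (m.divisors.filter (fun d => d * d ≤ m)).filter (fun d => ¬ d * d = m)
        = m.divisors.filter (fun d => d * d < m) := by
      rw [Finset.filter_filter]
      apply Finset.filter_congr
      intro d _
      constructor
      · rintro ⟨h1', h2'⟩; omega
      · intro h; omega
    rw [hne] at hsplit
    rw [e1, e2] at hsplit2
    have hpair := sqrt_pair_card m hm
    omega
  rw [h1, h2, h3, h4]
  push_cast
  ring

theorem pvDivCount_eq (x : Int) (hx : 0 ≤ x) :
    pvDivCount x = (x.toNat.divisors.card : Int) := by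
  obtain ⟨m, rfl⟩ : ∃ m : ℕ, x = (m : Int) := ⟨x.toNat, by omega⟩
  rw [pvDivCount]
  have hfun : (fun (c : Int) (d : Int) =>
      if PySem.Int.mod (m : Int) d == 0 then c + (if d * d == (m : Int) then 1 else 2) else c)
      = fun c d => c + (if PySem.Int.mod (m : Int) d == 0 then
          (if d * d == (m : Int) then (1 : Int) else 2) else 0) := by
    funext c d
    split <;> simp
  rw [hfun, PySem.List.foldl_add]
  have hN : ((Nat.sqrt (m : Int).toNat : Int) + 1 - 1).toNat = Nat.sqrt m := by
    simp
  rw [PySem.List.pyRange_one, hN, List.map_map, list_range_map_sum]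
  have hIco := Finset.sum_Ico_eq_sum_range
    (f := fun d : ℕ => if d ∣ m then (if d * d = m then (1 : Int) else 2) else 0)
    (m := 1) (n := Nat.sqrt m + 1)
  simp only [Nat.add_sub_cancel] at hIco
  simp only [Int.toNat_natCast]
  rw [← sqrt_pair_sum m, hIco, zero_add]
  apply Finset.sum_congr rfl
  intro k _
  simp only [Function.comp]
  have hd1 : ((1 + k : ℕ) : Int) = 1 + (k : Int) := by push_cast; ring
  have hdvd : (PySem.Int.mod (m : Int) (1 + (k : Int)) == 0) = true ↔ (1 + k) ∣ m := by
    rw [beq_iff_eq, PySem.Int.mod_eq_zero_iff_dvd, ← hd1, Int.natCast_dvd_natCast]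
  have hsq : ((1 + (k : Int)) * (1 + (k : Int)) == (m : Int)) = true ↔ (1 + k) * (1 + k) = m := by
    rw [beq_iff_eq, ← hd1]
    exact_mod_cast Int.natCast_inj (m := (1+k)*(1+k)) (n := m)
  by_cases h : (1 + k) ∣ m
  · rw [if_pos h, if_pos (hdvd.mpr h)]
    by_cases h2 : (1 + k) * (1 + k) = m
    · rw [if_pos h2, if_pos (hsq.mpr h2)]
    · rw [if_neg h2, if_neg (fun hc => h2 (hsq.mp hc))]
  · rw [if_neg h, if_neg (fun hc => h (hdvd.mp hc))]

theorem replicate_getD (N j : ℕ) : (List.replicate N (0 : Int)).getD j 0 = 0 := by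
  simp only [List.getD, List.getElem?_replicate]
  split <;> rfl

theorem index_loop_eq_map (A dv : List Int) :
    (PySem.List.pyRange 0 (A.length : Int) 1).foldl
        (fun res i => res + PySem.List.pyGetD dv (PySem.List.pyGetD A i 0) 0) 0
      = (A.map (fun v => PySem.List.pyGetD dv v 0)).sum := by
  rw [PySem.List.foldl_add, PySem.List.pyRange_zero_nat, List.map_map, zero_add]
  congr 1
  apply List.ext_getElem
  · simp
  · intro i h1 h2
    have hi : i < A.length := by simpa using h2
    simp only [List.getElem_map, List.getElem_range, Function.comp]
    rw [PySem.List.pyGetD_natCast, List.getD_eq_getElem A 0 hi]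

theorem main_eq (A : List Int) (hne : A ≠ []) (hpos : ∀ x ∈ A, 0 ≤ x) :
    LCM_HCF A = LCM_HCF_alt A := by
  obtain ⟨n, hn⟩ : ∃ n, PySem.List.max? A (fun x => x) = some n := by
    rcases h : PySem.List.max? A (fun x => x) with _ | n
    · exact absurd ((PySem.List.max?_eq_none_iff A _).mp h) hne
    · exact ⟨n, rfl⟩
  have hmem : n ∈ A := PySem.List.max?_mem hn
  have hn0 : 0 ≤ n := hpos n hmem
  have hmax : ∀ x ∈ A, x ≤ n := fun y hy => PySem.List.max?_isMax hn y hy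
  rw [LCM_HCF, LCM_HCF_alt, hn]
  simp only [Option.getD_some]
  rw [index_loop_eq_map, PySem.List.foldl_add, zero_add]
  congr 1
  apply List.map_congr_left
  intro x hx
  have hx0 : 0 ≤ x := hpos x hx
  have hxn : x ≤ n := hmax x hx
  rw [PySem.List.pyGetD_of_nonneg _ _ hx0]
  rw [sieve_outer_fold n x.toNat _ _
      (fun i hi => ((PySem.List.mem_pyRange_one).mp hi).1)
      (by simp; omega)]
  rw [replicate_getD, zero_add,
    sieve_sum_eq_divisors n hn0 x.toNat (by omega),
    pvDivCount_eq x hx0]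

-- ===== VERDICT (by name: the statement is the Claim_ definition above) =====
theorem LCM_HCF_spec : Claim_equal_LCM_HCF :=
  fun A _ hPre => main_eq A hPre.1 hPre.2
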